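-- pv_equiv track=rewrite | github.com/piaw/google-gtags | trunk/etags_to_tags.py | string_lisp_repr
-- ===== SOURCE A (Python) =====
-- def string_lisp_repr(string):
--   """
--   Prints a string as a lisp-readable string literal surrounded by
--   double quotes. (Python's repr would do the job, except it likes to
--   use single quotes and therefore won't escape double quotes.)
--   """
--   retval = '"'
--   for c in string:
--     if c == '\\' or c == '"':
--       retval += '\\'
--     retval += c
--   retval += '"'
--   return retval
-- ===== SOURCE B (Python) =====
-- def string_lisp_repr(string):
--   """
--   Prints a string as a lisp-readable string literal surrounded by
--   double quotes. (Python's repr would do the job, except it likes to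
--   use single quotes and therefore won't escape double quotes.)
--   """
--   return '"' + string.replace('\\', '\\\\').replace('"', '\\"') + '"'
-- ===== Notes on version B (the rewrite author's own statement) =====
-- stated objective: faster
-- what changed: Replaces A's manual char-by-char accumulating loop with two whole-string str.replace passes (backslashes first, then quotes) wrapped in quotes.
import Mathlib
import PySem

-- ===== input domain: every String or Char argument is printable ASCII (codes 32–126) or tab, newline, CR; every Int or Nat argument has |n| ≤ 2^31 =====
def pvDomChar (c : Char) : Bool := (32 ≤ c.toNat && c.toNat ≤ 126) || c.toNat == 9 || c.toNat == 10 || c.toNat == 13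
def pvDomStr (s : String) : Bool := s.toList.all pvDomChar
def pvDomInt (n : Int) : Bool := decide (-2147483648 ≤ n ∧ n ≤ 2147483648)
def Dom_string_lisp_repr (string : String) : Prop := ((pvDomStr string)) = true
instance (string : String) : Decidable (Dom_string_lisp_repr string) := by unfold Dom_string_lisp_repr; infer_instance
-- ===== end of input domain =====

-- B replaces A's char-by-char accumulating loop with two whole-string replace passes
-- (backslashes first, then quotes) wrapped in quotes; idiomatic, same value.

-- ===== PORT A =====
-- A: retval = '"'; for c in string: (if c is \ or " append \), append c; append '"'.
-- Ported on the code-point list (Python str concatenation = list append here).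
def string_lisp_repr (string : String) : String :=
  let retval : List Char :=
    string.toList.foldl
      (fun r c => (if c = '\\' ∨ c = '"' then r ++ ['\\'] else r) ++ [c]) ['"']
  String.ofList (retval ++ ['"'])

-- ===== PORT B =====
-- B: '"' + string.replace('\\','\\\\').replace('"','\\"') + '"'
def string_lisp_repr_alt (string : String) : String :=
  "\"" ++ PySem.Str.replace (PySem.Str.replace string "\\" "\\\\") "\"" "\\\"" ++ "\""

-- ===== PRECONDITION & SPEC =====
def Spec_string_lisp_repr (string : String) (out : String) : Prop := out = string_lisp_repr_alt string
instance (string : String) (out : String) : Decidable (Spec_string_lisp_repr string out) := by unfold Spec_string_lisp_repr; infer_instance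

-- ===== CLAIM (what is proved, stated in full; the proofs are below) =====
def Claim_equal_string_lisp_repr : Prop := ∀ (string : String), Dom_string_lisp_repr string → Spec_string_lisp_repr string (string_lisp_repr string)

-- ===== LEMMAS AND PROOFS =====

-- replace with a single-character pattern is a per-character flatMap
theorem replace_go_single (c : Char) (new : List Char) :
    ∀ (l acc : List Char) (fuel : Nat), l.length ≤ fuel →
      PySem.Chars.replace.go [c] new fuel l acc
        = acc.reverse ++ l.flatMap (fun x => if x = c then new else [x]) := by
  intro l
  induction l with
  | nil =>
    intro acc fuel _
    cases fuel <;> simp [PySem.Chars.replace.go]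
  | cons c' t ih =>
    intro acc fuel hf
    cases fuel with
    | zero => simp at hf
    | succ fuel =>
      by_cases h : c' = c
      · subst h
        have hpre : List.isPrefixOf [c'] (c' :: t) = true := by simp [List.isPrefixOf]
        simp only [PySem.Chars.replace.go, hpre, if_pos]
        rw [show List.drop [c'].length (c' :: t) = t from rfl,
           ih (new.reverse ++ acc) fuel (by simpa using Nat.lt_succ_iff.mp (by simpa using hf))]
        simp
      · have hpre : List.isPrefixOf [c] (c' :: t) = false := by
          simp [List.isPrefixOf]; exact fun he => (h he.symm).elim
        simp only [PySem.Chars.replace.go, hpre, Bool.false_eq_true, if_neg, not_false_iff]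
        rw [ih (c' :: acc) fuel (by simpa using Nat.lt_succ_iff.mp (by simpa using hf))]
        simp [h]

theorem replace_single (c : Char) (new s : List Char) :
    PySem.Chars.replace s [c] new = s.flatMap (fun x => if x = c then new else [x]) := by
  simp [PySem.Chars.replace]
  simpa using replace_go_single c new s [] s.length le_rfl

-- A's loop is a flatMap of the per-character escape
theorem foldl_escape (s init : List Char) :
    s.foldl (fun r c => (if c = '\\' ∨ c = '"' then r ++ ['\\'] else r) ++ [c]) init
      = init ++ s.flatMap (fun c => if c = '\\' ∨ c = '"' then ['\\', c] else [c]) := by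
  induction s generalizing init with
  | nil => simp
  | cons c t ih =>
    simp only [List.foldl_cons, ih, List.flatMap_cons]
    by_cases h : c = '\\' ∨ c = '"' <;> simp [h]

-- ===== VERDICT (by name: the statement is the Claim_ definition above) =====
theorem string_lisp_repr_spec : Claim_equal_string_lisp_repr := by
  intro s _
  show _ = _
  unfold string_lisp_repr string_lisp_repr_alt
  apply String.ext
  simp only [PySem.Str.replace, String.toList_ofList, String.toList_append, foldl_escape]
  rw [show ("\"" : String).toList = ['"'] from rfl,
      show ("\\" : String).toList = ['\\'] from rfl,
      show ("\\\\" : String).toList = ['\\', '\\'] from rfl,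
      show ("\\\"" : String).toList = ['\\', '"'] from rfl,
      replace_single, replace_single, List.flatMap_assoc]
  simp only [List.nil_append, List.cons_append, List.cons.injEq, true_and,
    List.append_cancel_right_eq]
  apply List.flatMap_congr
  intro c _
  by_cases hb : c = '\\'
  · simp [hb]
  by_cases hq : c = '"'
  · simp [hq]
  · simp [hb, hq]
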